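-- pv_equiv track=rewrite | github.com/shaiv-syg/Few-shot-NL2SQL-with-prompting | dfin/link_columns.py | find_create_table_boundaries
-- ===== SOURCE A (Python) =====
-- def find_create_table_boundaries(create_table: str):
--     # Split the input SQL string into lines
--     lines = create_table.strip().split('\n')
--
--     # Flags to check if we are inside the CREATE TABLE statement
--     inside_create_table = False
--     parenthesis_counter = 0
--
--     # Variables to store the start and end line numbers of the CREATE TABLE statement
--     start_line = None
--     end_line = None
--
--     # Iterate through each line
--     for i, line in enumerate(lines):
--         # Check if the line contains the CREATE TABLE statement
--         if line.strip().lower().startswith("create table"):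
--             inside_create_table = True
--             start_line = i
--             parenthesis_counter = line.count("(") - line.count(")")
--         elif inside_create_table:
--             # Update the parenthesis counter
--             parenthesis_counter += line.count("(") - line.count(")")
--
--             # If the parenthesis counter reaches zero, we have found the end of the CREATE TABLE statement
--             if parenthesis_counter == 0:
--                 end_line = i
--                 break
--
--     return start_line, end_line
-- ===== SOURCE B (Python) =====
-- def find_create_table_boundaries(create_table: str):
--     # Staged algorithm: precompute prefix sums of paren balance and the list of
--     # CREATE TABLE header line indices; for each header segment, the end line is
--     # the first k with prefix[k+1] == prefix[h] before the next header.
--     lines = create_table.strip().split('\n')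
--     n = len(lines)
--     prefix = [0]
--     for l in lines:
--         prefix.append(prefix[-1] + l.count("(") - l.count(")"))
--     headers = [i for i, l in enumerate(lines)
--                if l.strip().lower().startswith("create table")]
--     for idx, h in enumerate(headers):
--         bound = headers[idx + 1] if idx + 1 < len(headers) else n
--         target = prefix[h]
--         for k in range(h + 1, bound):
--             if prefix[k + 1] == target:
--                 return h, k
--         if idx + 1 == len(headers):
--             return h, None
--     return None, None
-- ===== Notes on version B (the rewrite author's own statement) =====
-- stated objective: alternative
-- what changed: Replaces A's single stateful scan (inside flag + running parenthesis counter) by a staged algorithm: precompute the prefix-sum list of per-line parenthesis balances and the list of CREATE TABLE header indices, then for each header segment find the end line as the first k with prefix[k+1] == prefix[h] before the next header.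
import Mathlib
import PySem

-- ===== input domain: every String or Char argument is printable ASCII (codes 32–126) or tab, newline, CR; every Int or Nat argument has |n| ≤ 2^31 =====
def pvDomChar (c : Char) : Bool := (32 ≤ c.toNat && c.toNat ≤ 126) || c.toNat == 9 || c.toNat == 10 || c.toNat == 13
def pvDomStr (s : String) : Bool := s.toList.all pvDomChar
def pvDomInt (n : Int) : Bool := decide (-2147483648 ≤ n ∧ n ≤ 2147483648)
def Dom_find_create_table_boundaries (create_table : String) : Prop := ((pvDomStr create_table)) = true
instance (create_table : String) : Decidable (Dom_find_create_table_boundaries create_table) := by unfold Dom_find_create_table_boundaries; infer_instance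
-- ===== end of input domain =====

-- B replaces A's single stateful scan (flag + running counter) by staged passes: a prefix-sum
-- list of per-line parenthesis balances, a list of header indices, and a segment search for
-- the first k with prefix[k+1] = prefix[h]; objective: alternative (same cost).

-- ===== PORT A =====
-- the loop of A: state = (inside flag, paren counter, start, end), index i; break returns directly
def pvLoopA (lines : List String) (i : Int) (inside : Bool) (pc : Int)
    (start_line end_line : Option Int) : Option Int × Option Int :=
  match lines with
  | [] => (start_line, end_line)
  | l :: rest =>
    if PySem.Str.startswith (PySem.Str.lower (PySem.Str.strip l)) "create table" then
      pvLoopA rest (i + 1) true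
        ((PySem.Str.count l "(" : Int) - (PySem.Str.count l ")" : Int)) (some i) end_line
    else if inside then
      let pc' := pc + ((PySem.Str.count l "(" : Int) - (PySem.Str.count l ")" : Int))
      if pc' = 0 then (start_line, some i)
      else pvLoopA rest (i + 1) inside pc' start_line end_line
    else pvLoopA rest (i + 1) inside pc start_line end_line

def find_create_table_boundaries (create_table : String) : Option Int × Option Int :=
  let lines := (PySem.Str.split? (PySem.Str.strip create_table) "\n").getD []
  pvLoopA lines 0 false 0 none none

-- ===== PORT B =====
-- l.count("(") - l.count(")"), the per-line parenthesis balance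
def pvDelta (l : String) : Int :=
  (PySem.Str.count l "(" : Int) - (PySem.Str.count l ")" : Int)

-- line is a CREATE TABLE header
def pvIsHeader (l : String) : Bool :=
  PySem.Str.startswith (PySem.Str.lower (PySem.Str.strip l)) "create table"

-- the prefix-building loop of B: accumulator s = prefix[-1]; yields prefix[1:]
def pvPrefixAux (s : Int) : List String → List Int
  | [] => []
  | l :: rest => (s + pvDelta l) :: pvPrefixAux (s + pvDelta l) rest

-- B's header-index comprehension: [i for i, l in enumerate(lines) if ...]
def pvHeadersAux (i : Int) : List String → List Int
  | [] => []
  | l :: rest =>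
    if pvIsHeader l then i :: pvHeadersAux (i + 1) rest else pvHeadersAux (i + 1) rest

-- B's inner loop over range(h+1, bound); prefix indices are always in range, so
-- Python's prefix[k+1] is ported as pyGet? with getD 0 (the default is never taken)
def pvInnerB (pre : List Int) (target : Int) : List Int → Option Int
  | [] => none
  | k :: ks =>
    if (PySem.List.pyGet? pre (k + 1)).getD 0 = target then some k
    else pvInnerB pre target ks

-- B's outer loop over headers with explicit "next header or n" bound
def pvOuterB (n : Int) (pre : List Int) : List Int → Option Int × Option Int
  | [] => (none, none)
  | h :: rest =>
    let bound : Int := match rest with | [] => n | h2 :: _ => h2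
    let target : Int := (PySem.List.pyGet? pre h).getD 0
    match pvInnerB pre target (PySem.List.pyRange (h + 1) bound 1) with
    | some k => (some h, some k)
    | none => match rest with | [] => (some h, none) | _ :: _ => pvOuterB n pre rest

def find_create_table_boundaries_alt (create_table : String) : Option Int × Option Int :=
  let lines := (PySem.Str.split? (PySem.Str.strip create_table) "\n").getD []
  pvOuterB (lines.length : Int) (0 :: pvPrefixAux 0 lines) (pvHeadersAux 0 lines)

-- ===== PRECONDITION & SPEC =====
def Spec_find_create_table_boundaries (create_table : String) (out : Option Int × Option Int) : Prop := out = find_create_table_boundaries_alt create_table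
instance (create_table : String) (out : Option Int × Option Int) : Decidable (Spec_find_create_table_boundaries create_table out) := by unfold Spec_find_create_table_boundaries; infer_instance

-- ===== CLAIM (what is proved, stated in full; the proofs are below) =====
def Claim_equal_find_create_table_boundaries : Prop := ∀ (create_table : String), Dom_find_create_table_boundaries create_table → Spec_find_create_table_boundaries create_table (find_create_table_boundaries create_table)

-- ===== LEMMAS AND PROOFS =====

-- proof-only: sum of the first j per-line balances (the value of prefix[j])
def pvSS (L : List String) (j : Nat) : Int := ((L.take j).map pvDelta).sum

theorem pvSS_succ (L : List String) (j : Nat) (hj : j < L.length) :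
    pvSS L (j + 1) = pvSS L j + pvDelta (L[j]) := by
  unfold pvSS
  rw [List.map_take, List.sum_take_succ _ j (by simpa using hj)]
  simp

-- the prefix list really is the prefix sums
theorem pvPrefixAux_get : ∀ (L : List String) (s : Int) (m : Nat), m < L.length →
    (pvPrefixAux s L)[m]? = some (s + pvSS L (m + 1)) := by
  intro L
  induction L with
  | nil => intro s m hm; simp at hm
  | cons l rest ih =>
    intro s m hm
    cases m with
    | zero => simp [pvPrefixAux, pvSS]
    | succ m =>
      simp only [pvPrefixAux, List.getElem?_cons_succ]
      rw [ih (s + pvDelta l) m (by simpa using hm)]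
      have : pvSS (l :: rest) (m + 1 + 1) = pvDelta l + pvSS rest (m + 1) := by
        simp [pvSS]
      rw [this]; ring_nf

theorem pvPrefix_get (L : List String) (j : Nat) (hj : j ≤ L.length) :
    (PySem.List.pyGet? (0 :: pvPrefixAux 0 L) (j : Int)).getD 0 = pvSS L j := by
  rw [PySem.List.pyGet?_natCast]
  cases j with
  | zero => simp [pvSS]
  | succ j =>
    simp only [List.getElem?_cons_succ]
    rw [pvPrefixAux_get L 0 j (by omega)]
    simp

-- header indices produced from start i are ≥ i
theorem pvHeadersAux_ge : ∀ (ts : List String) (i h : Int), h ∈ pvHeadersAux i ts → i ≤ h := by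
  intro ts
  induction ts with
  | nil => intro i h hm; simp [pvHeadersAux] at hm
  | cons l rest ih =>
    intro i h hm
    simp only [pvHeadersAux] at hm
    split_ifs at hm with hl
    · rcases List.mem_cons.mp hm with rfl | hm
      · omega
      · have := ih (i + 1) h hm; omega
    · have := ih (i + 1) h hm; omega

-- proof-only: the continuation A's inner scan computes, phrased in B's terms
def pvCont (L : List String) (h : Nat) (i : Int) (hd : List Int) : Option Int × Option Int :=
  match hd with
  | [] =>
    match pvInnerB (0 :: pvPrefixAux 0 L) (pvSS L h) (PySem.List.pyRange i (L.length : Int) 1) with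
    | some k => (some (h : Int), some k)
    | none => (some (h : Int), none)
  | h2 :: hs =>
    match pvInnerB (0 :: pvPrefixAux 0 L) (pvSS L h) (PySem.List.pyRange i h2 1) with
    | some k => (some (h : Int), some k)
    | none => pvOuterB (L.length : Int) (0 :: pvPrefixAux 0 L) (h2 :: hs)

-- B's outer step at a fresh header h equals the continuation entered just past h
theorem pvOuterB_cons_eq_pvCont (L : List String) (h : Nat) (hs : List Int)
    (hh : h < L.length) :
    pvOuterB (L.length : Int) (0 :: pvPrefixAux 0 L) ((h : Int) :: hs)
      = pvCont L h ((h : Int) + 1) hs := by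
  cases hs with
  | nil =>
    simp only [pvOuterB, pvCont, pvPrefix_get L h (by omega)]
  | cons h2 hs' =>
    simp only [pvOuterB, pvCont, pvPrefix_get L h (by omega)]

-- main bridge for A's "inside" state: start = h, balance = pvSS j - pvSS h
theorem pvLoopA_inside (L : List String) : ∀ (ts : List String) (j h : Nat),
    ts = L.drop j → h < j →
    pvLoopA ts (j : Int) true (pvSS L j - pvSS L h) (some (h : Int)) none
      = pvCont L h (j : Int) (pvHeadersAux (j : Int) ts) := by
  intro ts
  induction ts with
  | nil =>
    intro j h hts _
    have hj : L.length ≤ j := List.drop_eq_nil_iff.mp hts.symm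
    have hr : PySem.List.pyRange (j : Int) (L.length : Int) 1 = [] :=
      PySem.List.pyRange_one_eq_nil (by exact_mod_cast hj)
    simp [pvLoopA, pvHeadersAux, pvCont, hr, pvInnerB]
  | cons l rest ih =>
    intro j h hts hh
    have hjlen : j < L.length := by
      by_contra hge
      rw [List.drop_eq_nil_of_le (by omega)] at hts
      exact List.cons_ne_nil _ _ hts
    have hsplit : l = L[j] ∧ rest = L.drop (j + 1) := by
      have h2 := List.getElem_cons_drop (as := L) (i := j) hjlen
      rw [← hts] at h2
      exact ⟨(List.cons.injEq _ _ _ _ ▸ h2.symm).1, (List.cons.injEq _ _ _ _ ▸ h2.symm).2⟩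
    have hdelta : pvSS L (j + 1) = pvSS L j + pvDelta l := by
      rw [pvSS_succ L j hjlen, hsplit.1]
    have hcast : (j : Int) + 1 = ((j + 1 : Nat) : Int) := by push_cast; ring
    by_cases hl : PySem.Chars.startswith (PySem.Chars.lower (PySem.Chars.strip l.toList)) ['c', 'r', 'e', 'a', 't', 'e', ' ', 't', 'a', 'b', 'l', 'e'] = true
    · -- header line: A resets; B's continuation defers to pvOuterB on (j :: headers after)
      have hA : pvLoopA (l :: rest) (j : Int) true (pvSS L j - pvSS L h) (some (h : Int)) none
          = pvLoopA rest ((j : Int) + 1) true (pvDelta l) (some (j : Int)) none := by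
        simp [pvLoopA, pvDelta, hl]
      have hbal : pvDelta l = pvSS L (j + 1) - pvSS L j := by omega
      rw [hA, hbal, hcast]
      rw [ih (j + 1) j hsplit.2 (by omega)]
      have hhd : pvHeadersAux (j : Int) (l :: rest)
          = (j : Int) :: pvHeadersAux ((j : Int) + 1) rest := by
        simp [pvHeadersAux, pvIsHeader, hl]
      rw [hhd]
      have : pvCont L h (j : Int) ((j : Int) :: pvHeadersAux ((j : Int) + 1) rest)
          = pvOuterB (L.length : Int) (0 :: pvPrefixAux 0 L)
              ((j : Int) :: pvHeadersAux ((j : Int) + 1) rest) := by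
        simp only [pvCont, PySem.List.pyRange_one_eq_nil (le_refl (j : Int)), pvInnerB]
      rw [this, pvOuterB_cons_eq_pvCont L j _ hjlen, hcast]
    · -- ordinary line: balance test; prefix[j+1] = target ↔ running balance hits zero
      have hA : pvLoopA (l :: rest) (j : Int) true (pvSS L j - pvSS L h) (some (h : Int)) none
          = (if pvSS L j - pvSS L h + pvDelta l = 0 then ((some (h : Int)), some (j : Int))
             else pvLoopA rest ((j : Int) + 1) true (pvSS L j - pvSS L h + pvDelta l)
                    (some (h : Int)) none) := by
        simp [pvLoopA, pvDelta, hl]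
      have hget : (PySem.List.pyGet? (0 :: pvPrefixAux 0 L) ((j : Int) + 1)).getD 0
          = pvSS L (j + 1) := by
        rw [hcast, pvPrefix_get L (j + 1) (by omega)]
      have hcond : ((PySem.List.pyGet? (0 :: pvPrefixAux 0 L) ((j : Int) + 1)).getD 0 = pvSS L h)
          ↔ (pvSS L j - pvSS L h + pvDelta l = 0) := by
        rw [hget]; omega
      have hbal2 : pvSS L j - pvSS L h + pvDelta l = pvSS L (j + 1) - pvSS L h := by omega
      have hhd : pvHeadersAux (j : Int) (l :: rest) = pvHeadersAux ((j : Int) + 1) rest := by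
        simp [pvHeadersAux, pvIsHeader, hl]
      rw [hA, hhd]
      -- both continuation shapes start their range at j, whose head test is the balance test
      rcases hhds : pvHeadersAux ((j : Int) + 1) rest with _ | ⟨h2, hs⟩
      · have hrj : PySem.List.pyRange (j : Int) (L.length : Int) 1
            = (j : Int) :: PySem.List.pyRange ((j : Int) + 1) (L.length : Int) 1 :=
          PySem.List.pyRange_one_cons (by exact_mod_cast hjlen)
        simp only [pvCont, hrj, pvInnerB]
        by_cases hz : pvSS L j - pvSS L h + pvDelta l = 0
        · rw [if_pos hz, if_pos (hcond.mpr hz)]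
        · rw [if_neg hz, if_neg (fun hc => hz (hcond.mp hc))]
          rw [hbal2, hcast, ih (j + 1) h hsplit.2 (by omega), ← hcast, hhds]
          simp only [pvCont]
      · have hj2 : (j : Int) < h2 := by
          have := pvHeadersAux_ge rest ((j : Int) + 1) h2 (by rw [hhds]; exact List.mem_cons_self)
          omega
        have hrj : PySem.List.pyRange (j : Int) h2 1
            = (j : Int) :: PySem.List.pyRange ((j : Int) + 1) h2 1 :=
          PySem.List.pyRange_one_cons hj2
        simp only [pvCont, hrj, pvInnerB]
        by_cases hz : pvSS L j - pvSS L h + pvDelta l = 0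
        · rw [if_pos hz, if_pos (hcond.mpr hz)]
        · rw [if_neg hz, if_neg (fun hc => hz (hcond.mp hc))]
          rw [hbal2, hcast, ih (j + 1) h hsplit.2 (by omega), ← hcast, hhds]
          simp only [pvCont]

-- bridge for A's "outside" state: no header seen yet
theorem pvLoopA_outside (L : List String) : ∀ (ts : List String) (j : Nat),
    ts = L.drop j →
    pvLoopA ts (j : Int) false 0 none none
      = pvOuterB (L.length : Int) (0 :: pvPrefixAux 0 L) (pvHeadersAux (j : Int) ts) := by
  intro ts
  induction ts with
  | nil => intro j _; simp [pvLoopA, pvHeadersAux, pvOuterB]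
  | cons l rest ih =>
    intro j hts
    have hjlen : j < L.length := by
      by_contra hge
      rw [List.drop_eq_nil_of_le (by omega)] at hts
      exact List.cons_ne_nil _ _ hts
    have hsplit : l = L[j] ∧ rest = L.drop (j + 1) := by
      have h2 := List.getElem_cons_drop (as := L) (i := j) hjlen
      rw [← hts] at h2
      exact ⟨(List.cons.injEq _ _ _ _ ▸ h2.symm).1, (List.cons.injEq _ _ _ _ ▸ h2.symm).2⟩
    have hcast : (j : Int) + 1 = ((j + 1 : Nat) : Int) := by push_cast; ring
    by_cases hl : PySem.Chars.startswith (PySem.Chars.lower (PySem.Chars.strip l.toList)) ['c', 'r', 'e', 'a', 't', 'e', ' ', 't', 'a', 'b', 'l', 'e'] = true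
    · have hA : pvLoopA (l :: rest) (j : Int) false 0 none none
          = pvLoopA rest ((j : Int) + 1) true (pvDelta l) (some (j : Int)) none := by
        simp [pvLoopA, pvDelta, hl]
      have hbal : pvDelta l = pvSS L (j + 1) - pvSS L j := by
        rw [pvSS_succ L j hjlen, hsplit.1]; ring
      rw [hA, hbal, hcast, pvLoopA_inside L rest (j + 1) j hsplit.2 (by omega)]
      have hhd : pvHeadersAux (j : Int) (l :: rest)
          = (j : Int) :: pvHeadersAux ((j : Int) + 1) rest := by
        simp [pvHeadersAux, pvIsHeader, hl]
      rw [hhd, pvOuterB_cons_eq_pvCont L j _ hjlen, hcast]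
    · have hA : pvLoopA (l :: rest) (j : Int) false 0 none none
          = pvLoopA rest ((j : Int) + 1) false 0 none none := by
        simp [pvLoopA, hl]
      have hhd : pvHeadersAux (j : Int) (l :: rest) = pvHeadersAux ((j : Int) + 1) rest := by
        simp [pvHeadersAux, pvIsHeader, hl]
      rw [hA, hhd, hcast, ih (j + 1) hsplit.2]

-- ===== VERDICT (by name: the statement is the Claim_ definition above) =====
theorem find_create_table_boundaries_spec : Claim_equal_find_create_table_boundaries := by
  intro s _
  unfold Spec_find_create_table_boundaries find_create_table_boundaries
    find_create_table_boundaries_alt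
  have h := pvLoopA_outside ((PySem.Str.split? (PySem.Str.strip s) "\n").getD [])
    ((PySem.Str.split? (PySem.Str.strip s) "\n").getD []) 0 (by simp)
  simpa only [Nat.cast_zero] using h
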